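-- pv_equiv track=rewrite | github.com/starkadur/Tagging | TEI/tok_tag_lem.py | calculate_indices
-- ===== SOURCE A (Python) =====
-- def calculate_indices(texts):
--
--     indices = []
--     index = 0
--     for text in texts:
--         text = text.replace(" ","")
--
--         index+=len(text)
--         indices.append(index)
--     return indices
-- ===== SOURCE B (Python) =====
-- def calculate_indices(texts):
--     lens = [len(t.replace(" ", "")) for t in texts]
--     remaining = sum(lens)
--     out = []
--     for n in reversed(lens):
--         out.append(remaining)
--         remaining -= n
--     out.reverse()
--     return out
-- ===== Notes on version B (the rewrite author's own statement) =====
-- stated objective: alternative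
-- what changed: Instead of a forward running-sum accumulator, B first totals all stripped lengths and then builds the result back-to-front by subtracting each length from a running remainder, reversing at the end.
import Mathlib
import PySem

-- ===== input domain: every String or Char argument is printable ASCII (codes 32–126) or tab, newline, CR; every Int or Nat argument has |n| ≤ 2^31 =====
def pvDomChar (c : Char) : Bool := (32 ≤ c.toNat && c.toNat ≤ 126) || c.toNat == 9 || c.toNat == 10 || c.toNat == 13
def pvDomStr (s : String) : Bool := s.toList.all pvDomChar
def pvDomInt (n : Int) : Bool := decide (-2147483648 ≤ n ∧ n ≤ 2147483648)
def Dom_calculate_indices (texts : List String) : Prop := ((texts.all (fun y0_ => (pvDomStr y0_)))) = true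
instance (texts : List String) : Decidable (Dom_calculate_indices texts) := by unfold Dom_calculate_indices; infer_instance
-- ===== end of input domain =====

-- B: totals the stripped lengths first, then builds the list back-to-front by subtracting a running remainder (alternative decomposition).


-- ===== PORT A =====
def calculate_indices (texts : List String) : List Int :=
  (texts.foldl (fun (st : List Int × Int) text =>
      let text := PySem.Str.replace text " " ""
      let index := st.2 + PySem.Str.len text
      (st.1 ++ [index], index)) ([], 0)).1

-- ===== PORT B =====
def calculate_indices_alt (texts : List String) : List Int :=
  let lens := texts.map (fun t => PySem.Str.len (PySem.Str.replace t " " ""))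
  let remaining := lens.sum
  let st := lens.reverse.foldl (fun (st : List Int × Int) n =>
      (st.1 ++ [st.2], st.2 - n)) ([], remaining)
  st.1.reverse

-- ===== PRECONDITION & SPEC =====
def Spec_calculate_indices (texts : List String) (out : List Int) : Prop := out = calculate_indices_alt texts
instance (texts : List String) (out : List Int) : Decidable (Spec_calculate_indices texts out) := by unfold Spec_calculate_indices; infer_instance

-- ===== CLAIM (what is proved, stated in full; the proofs are below) =====
def Claim_equal_calculate_indices : Prop := ∀ (texts : List String), Dom_calculate_indices texts → Spec_calculate_indices texts (calculate_indices texts)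

-- ===== LEMMAS AND PROOFS =====

-- forward prefix sums of an Int list, starting from a base
def pvAccum (xs : List Int) (base : Int) : List Int :=
  match xs with
  | [] => []
  | x :: rest => (base + x) :: pvAccum rest (base + x)

-- back-to-front list built by B's loop before the final reverse
def pvBack (ys : List Int) (s : Int) : List Int :=
  match ys with
  | [] => []
  | y :: rest => s :: pvBack rest (s - y)

lemma pvAccum_append_singleton (xs : List Int) (base y : Int) :
    pvAccum (xs ++ [y]) base = pvAccum xs base ++ [base + xs.sum + y] := by
  induction xs generalizing base with
  | nil => simp [pvAccum]
  | cons x rest ih =>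
      simp only [List.cons_append, pvAccum, ih, List.sum_cons]
      ring_nf

lemma calc_A_fold (texts : List String) (ind : List Int) (acc : Int) :
    (texts.foldl (fun (st : List Int × Int) text =>
        let text := PySem.Str.replace text " " ""
        let index := st.2 + PySem.Str.len text
        (st.1 ++ [index], index)) (ind, acc)).1
      = ind ++ pvAccum (texts.map (fun t => PySem.Str.len (PySem.Str.replace t " " ""))) acc := by
  induction texts generalizing ind acc with
  | nil => simp [pvAccum]
  | cons t rest ih =>
      simp only [List.foldl_cons, List.map_cons, pvAccum]
      rw [ih]
      simp

lemma calc_B_fold (ys : List Int) (out : List Int) (s : Int) :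
    (ys.foldl (fun (st : List Int × Int) n =>
        (st.1 ++ [st.2], st.2 - n)) (out, s)).1 = out ++ pvBack ys s := by
  induction ys generalizing out s with
  | nil => simp [pvBack]
  | cons y rest ih =>
      simp only [List.foldl_cons, pvBack]
      rw [ih]
      simp

lemma pvBack_reverse (ys : List Int) (base : Int) :
    (pvBack ys (base + ys.sum)).reverse = pvAccum ys.reverse base := by
  induction ys generalizing base with
  | nil => simp [pvBack, pvAccum]
  | cons y rest ih =>
      simp only [pvBack, List.sum_cons, List.reverse_cons]
      rw [pvAccum_append_singleton]
      have h1 : base + (y + rest.sum) - y = base + rest.sum := by ring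
      have h2 : base + rest.reverse.sum + y = base + (y + rest.sum) := by
        rw [List.sum_reverse]; ring
      rw [h1, ih, h2]

-- ===== VERDICT (by name: the statement is the Claim_ definition above) =====
theorem calculate_indices_spec : Claim_equal_calculate_indices := by
  intro texts _
  unfold Spec_calculate_indices calculate_indices calculate_indices_alt
  set lens := texts.map (fun t => PySem.Str.len (PySem.Str.replace t " " "")) with hlens
  show (texts.foldl _ ([], 0)).1 = ((lens.reverse.foldl (fun (st : List Int × Int) n => (st.1 ++ [st.2], st.2 - n)) ([], lens.sum)).1).reverse
  rw [calc_A_fold, calc_B_fold]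
  simp only [List.nil_append, ← hlens]
  have h := pvBack_reverse lens.reverse 0
  simp only [List.reverse_reverse, List.sum_reverse, zero_add] at h
  exact h.symm
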